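-- pv_equiv track=rewrite | github.com/yakimka/cs-wayback-machine | cs_wayback_machine/web/presenters.py | _choose_game_version
-- ===== SOURCE A (Python) =====
-- def _choose_game_version(game_versions: list[str]) -> str:
--     game_versions = [_format_game_version(item) for item in game_versions]
--     if not game_versions:
--         return "-"
--     priority = ["-", "CS1.6", "CS:S", "CS:GO", "CS2"]
--     for item in priority:
--         if item in game_versions:
--             return item
--     return "-"
--
-- def _format_game_version(val: str | None) -> str:
--     if not val:
--         return "-"
--     val = val.strip()
--     val_lower = val.lower()
--     if "source" in val_lower:
--         return "CS:S"
--     if val_lower == "cs":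
--         return "CS1.6"
--     # Due to the data representation inconsistency
--     #   we can't be sure about the exact game version
--     #   so show only old versions
--     if "2" in val_lower or "go" in val_lower:
--         return "-"
--     return val
-- ===== SOURCE B (Python) =====
-- _RANK = {"-": 0, "CS1.6": 1, "CS:S": 2, "CS:GO": 3, "CS2": 4}
--
--
-- def _format_game_version(val):
--     if not val:
--         return "-"
--     val = val.strip()
--     val_lower = val.lower()
--     if "source" in val_lower:
--         return "CS:S"
--     if val_lower == "cs":
--         return "CS1.6"
--     if "2" in val_lower or "go" in val_lower:
--         return "-"
--     return val
--
--
-- def _choose_game_version(game_versions):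
--     best_rank = 5
--     best = "-"
--     for item in game_versions:
--         formatted = _format_game_version(item)
--         rank = _RANK.get(formatted, 5)
--         if rank < best_rank:
--             best_rank = rank
--             best = formatted
--     return best
-- ===== Notes on version B (the rewrite author's own statement) =====
-- stated objective: alternative
-- what changed: Replaces A's five sequential membership scans over the formatted list with a single pass keeping the formatted element of smallest rank from a rank table, defaulting to '-' when no ranked element occurs.
import Mathlib
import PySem

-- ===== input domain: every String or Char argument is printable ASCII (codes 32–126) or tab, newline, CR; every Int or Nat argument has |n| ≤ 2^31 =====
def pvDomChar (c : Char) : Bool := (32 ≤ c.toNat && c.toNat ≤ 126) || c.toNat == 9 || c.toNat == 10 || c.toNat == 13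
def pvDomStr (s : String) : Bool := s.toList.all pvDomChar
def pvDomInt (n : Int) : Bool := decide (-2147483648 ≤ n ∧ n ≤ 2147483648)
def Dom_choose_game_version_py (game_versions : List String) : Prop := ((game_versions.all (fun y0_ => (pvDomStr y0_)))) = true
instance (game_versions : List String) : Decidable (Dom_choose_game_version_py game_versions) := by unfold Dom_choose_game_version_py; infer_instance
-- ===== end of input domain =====

-- B replaces A's five sequential priority-membership scans with one pass tracking the
-- smallest-rank formatted element via a rank table (alternative decomposition, same cost class).


-- ===== PORT A =====
-- shared helper: port of _format_game_version (both Pythons use the same formatter)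
def format_game_version (val : String) : String :=
  if val = "" then "-"
  else
    let v := PySem.Str.strip val
    let vl := PySem.Str.lower v
    if PySem.Str.isIn "source" vl then "CS:S"
    else if vl = "cs" then "CS1.6"
    else if PySem.Str.isIn "2" vl || PySem.Str.isIn "go" vl then "-"
    else v

def choose_game_version_py (game_versions : List String) : String :=
  let gv := game_versions.map format_game_version
  if gv.isEmpty then "-"
  else
    match (["-", "CS1.6", "CS:S", "CS:GO", "CS2"]).find? (fun item => gv.contains item) with
    | some item => item
    | none => "-"

-- ===== PORT B =====
def rankDict : PySem.Dict String Int :=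
  PySem.Dict.ofList [("-", 0), ("CS1.6", 1), ("CS:S", 2), ("CS:GO", 3), ("CS2", 4)]

def choose_game_version_py_alt (game_versions : List String) : String :=
  (game_versions.foldl
    (fun (b : Int × String) item =>
      let formatted := format_game_version item
      let rank := rankDict.getD formatted 5
      if rank < b.1 then (rank, formatted) else b)
    (5, "-")).2

-- ===== PRECONDITION & SPEC =====
def Spec_choose_game_version_py (game_versions : List String) (out : String) : Prop := out = choose_game_version_py_alt game_versions
instance (game_versions : List String) (out : String) : Decidable (Spec_choose_game_version_py game_versions out) := by unfold Spec_choose_game_version_py; infer_instance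

-- ===== CLAIM (what is proved, stated in full; the proofs are below) =====
def Claim_equal_choose_game_version_py : Prop := ∀ (game_versions : List String), Dom_choose_game_version_py game_versions → Spec_choose_game_version_py game_versions (choose_game_version_py game_versions)

-- ===== LEMMAS AND PROOFS =====

-- rank of a formatted string, as a plain if-chain (proof-side view of rankDict.getD · 5)
def rk (s : String) : Int :=
  if s = "-" then 0 else if s = "CS1.6" then 1 else if s = "CS:S" then 2
  else if s = "CS:GO" then 3 else if s = "CS2" then 4 else 5

-- the name at a rank (5 and anything else map to "-")
def gName (m : Int) : String :=
  if m = 0 then "-" else if m = 1 then "CS1.6" else if m = 2 then "CS:S"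
  else if m = 3 then "CS:GO" else if m = 4 then "CS2" else "-"

theorem rank_eval (s : String) : rankDict.getD s 5 = rk s := by
  unfold rk
  split_ifs with h1 h2 h3 h4 h5
  · subst h1; decide
  · subst h2; decide
  · subst h3; decide
  · subst h4; decide
  · subst h5; decide
  · apply PySem.Dict.getD_of_not_contains
    have h : rankDict = PySem.Dict.mk [("-", 0), ("CS1.6", 1), ("CS:S", 2), ("CS:GO", 3), ("CS2", 4)] := by
      decide
    rw [h]
    simp only [PySem.Dict.contains_mk, List.any_cons, List.any_nil, Bool.or_false,
      Bool.or_eq_false_iff, beq_eq_false_iff_ne, ne_eq]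
    exact ⟨fun e => h1 e.symm, fun e => h2 e.symm, fun e => h3 e.symm, fun e => h4 e.symm,
      fun e => h5 e.symm⟩

theorem rk_nonneg (s : String) : 0 ≤ rk s := by unfold rk; split_ifs <;> omega

theorem gName_rk (s : String) (h : rk s < 5) : gName (rk s) = s := by
  unfold rk at *; unfold gName
  split_ifs at h ⊢ <;> first | rfl | simp_all | omega

theorem rk_eq_iff (s : String) (k : Int) (hk0 : 0 ≤ k) (hk : k < 5) :
    rk s = k ↔ s = gName k := by
  constructor
  · intro h; rw [← h]; exact (gName_rk s (h ▸ hk)).symm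
  · intro h; subst h; unfold gName rk; split_ifs <;> simp_all <;> omega

def mfold (ys : List String) (a : Int) : Int :=
  ys.foldl (fun c y => if rk y < c then rk y else c) a

theorem mfold_le_init (ys : List String) (a : Int) : mfold ys a ≤ a := by
  induction ys generalizing a with
  | nil => simp [mfold]
  | cons y ys ih =>
    simp only [mfold, List.foldl_cons]
    split_ifs with h
    · exact le_trans (ih _) (le_of_lt h)
    · exact ih _

theorem mfold_le_mem (ys : List String) (a : Int) (y : String) (hy : y ∈ ys) :
    mfold ys a ≤ rk y := by
  induction ys generalizing a with
  | nil => cases hy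
  | cons z zs ih =>
    simp only [mfold, List.foldl_cons]
    rcases List.mem_cons.mp hy with rfl | hy'
    · split_ifs with h
      · exact mfold_le_init zs _
      · exact le_trans (mfold_le_init zs a) (by omega)
    · split_ifs with h <;> exact ih _ hy'

theorem mfold_attained (ys : List String) (a : Int) :
    mfold ys a = a ∨ ∃ y ∈ ys, mfold ys a = rk y := by
  induction ys generalizing a with
  | nil => left; simp [mfold]
  | cons z zs ih =>
    simp only [mfold, List.foldl_cons]
    split_ifs with h
    · rcases ih (rk z) with h1 | ⟨y, hy, h2⟩
      · exact Or.inr ⟨z, List.mem_cons_self .., h1⟩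
      · exact Or.inr ⟨y, List.mem_cons_of_mem _ hy, h2⟩
    · rcases ih a with h1 | ⟨y, hy, h2⟩
      · exact Or.inl h1
      · exact Or.inr ⟨y, List.mem_cons_of_mem _ hy, h2⟩

-- B's pair fold carries exactly (current minimum rank, its name)
theorem pairfold_spec (ys : List String) (a : Int) (ha : a ≤ 5) :
    ys.foldl (fun (b : Int × String) y =>
        if rk y < b.1 then (rk y, y) else b) (a, gName a)
      = (mfold ys a, gName (mfold ys a)) := by
  induction ys generalizing a with
  | nil => simp [mfold]
  | cons z zs ih =>
    simp only [List.foldl_cons, mfold, List.foldl_cons]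
    split_ifs with h
    · have hz : rk z < 5 := lt_of_lt_of_le h ha
      conv_lhs => rw [show (rk z, z) = (rk z, gName (rk z)) by rw [gName_rk z hz]]
      exact ih (rk z) (le_of_lt hz)
    · exact ih a ha

theorem contains_name (ys : List String) (k : Int) (hk0 : 0 ≤ k) (hk : k < 5) :
    ys.contains (gName k) = true ↔ ∃ y ∈ ys, rk y = k := by
  simp only [List.contains_iff_mem]
  constructor
  · intro h; exact ⟨gName k, h, (rk_eq_iff _ k hk0 hk).mpr rfl⟩
  · rintro ⟨y, hy, hr⟩
    rwa [← (rk_eq_iff y k hk0 hk).mp hr]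

theorem not_contains_of_lt (ys : List String) (a : Int) (k : Int) (hk0 : 0 ≤ k)
    (hk : k < 5) (hlt : k < mfold ys a) : ys.contains (gName k) = false := by
  rw [Bool.eq_false_iff]
  intro hc
  rcases (contains_name ys k hk0 hk).mp hc with ⟨y, hy, hr⟩
  have := mfold_le_mem ys a y hy
  omega

-- A's priority scan equals the name of the minimum rank
theorem scan_eq (ys : List String) :
    (if ys.isEmpty then "-"
     else match (["-", "CS1.6", "CS:S", "CS:GO", "CS2"]).find? (fun item => ys.contains item) with
          | some item => item
          | none => "-") = gName (mfold ys 5) := by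
  by_cases hemp : ys = []
  · subst hemp; simp [mfold, gName]
  · rw [if_neg (by simpa [List.isEmpty_iff] using hemp)]
    have hm5 : mfold ys 5 ≤ 5 := mfold_le_init ys 5
    have hm0 : 0 ≤ mfold ys 5 := by
      rcases mfold_attained ys 5 with h | ⟨y, _, h⟩
      · omega
      · have := rk_nonneg y; omega
    have hpres : ∀ k : Int, 0 ≤ k → k < 5 → mfold ys 5 = k → ys.contains (gName k) = true := by
      intro k h0 h5 hk
      rcases mfold_attained ys 5 with h | ⟨y, hy, h⟩
      · omega
      · exact (contains_name ys k h0 h5).mpr ⟨y, hy, by omega⟩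
    obtain ⟨m, hm, h0, h5⟩ : ∃ m, mfold ys 5 = m ∧ 0 ≤ m ∧ m ≤ 5 := ⟨_, rfl, hm0, hm5⟩
    rw [hm]
    interval_cases m
    · have c0 := hpres 0 (by omega) (by omega) hm
      norm_num [gName] at c0 ⊢
      simp [List.find?, c0]
    · have c0 := not_contains_of_lt ys 5 0 (by omega) (by omega) (by omega)
      have c1 := hpres 1 (by omega) (by omega) hm
      norm_num [gName] at c0 c1 ⊢
      simp [List.find?, c0, c1]
    · have c0 := not_contains_of_lt ys 5 0 (by omega) (by omega) (by omega)
      have c1 := not_contains_of_lt ys 5 1 (by omega) (by omega) (by omega)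
      have c2 := hpres 2 (by omega) (by omega) hm
      norm_num [gName] at c0 c1 c2 ⊢
      simp [List.find?, c0, c1, c2]
    · have c0 := not_contains_of_lt ys 5 0 (by omega) (by omega) (by omega)
      have c1 := not_contains_of_lt ys 5 1 (by omega) (by omega) (by omega)
      have c2 := not_contains_of_lt ys 5 2 (by omega) (by omega) (by omega)
      have c3 := hpres 3 (by omega) (by omega) hm
      norm_num [gName] at c0 c1 c2 c3 ⊢
      simp [List.find?, c0, c1, c2, c3]
    · have c0 := not_contains_of_lt ys 5 0 (by omega) (by omega) (by omega)
      have c1 := not_contains_of_lt ys 5 1 (by omega) (by omega) (by omega)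
      have c2 := not_contains_of_lt ys 5 2 (by omega) (by omega) (by omega)
      have c3 := not_contains_of_lt ys 5 3 (by omega) (by omega) (by omega)
      have c4 := hpres 4 (by omega) (by omega) hm
      norm_num [gName] at c0 c1 c2 c3 c4 ⊢
      simp [List.find?, c0, c1, c2, c3, c4]
    · have c0 := not_contains_of_lt ys 5 0 (by omega) (by omega) (by omega)
      have c1 := not_contains_of_lt ys 5 1 (by omega) (by omega) (by omega)
      have c2 := not_contains_of_lt ys 5 2 (by omega) (by omega) (by omega)
      have c3 := not_contains_of_lt ys 5 3 (by omega) (by omega) (by omega)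
      have c4 := not_contains_of_lt ys 5 4 (by omega) (by omega) (by omega)
      norm_num [gName] at c0 c1 c2 c3 c4 ⊢
      simp [List.find?, c0, c1, c2, c3, c4]

theorem alt_eq (gv : List String) :
    choose_game_version_py_alt gv = gName (mfold (gv.map format_game_version) 5) := by
  unfold choose_game_version_py_alt
  simp only [rank_eval]
  rw [← List.foldl_map (f := format_game_version)
      (g := fun (b : Int × String) y => if rk y < b.1 then (rk y, y) else b)]
  have h5 : ("-" : String) = gName 5 := by norm_num [gName]
  rw [h5, pairfold_spec (gv.map format_game_version) 5 le_rfl]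

-- ===== VERDICT (by name: the statement is the Claim_ definition above) =====
theorem choose_game_version_py_spec : Claim_equal_choose_game_version_py := by
  intro gv _
  unfold Spec_choose_game_version_py
  rw [alt_eq]
  exact scan_eq (gv.map format_game_version)
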